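-- pv_equiv track=rewrite | github.com/molcathy/Python_QR_Code | qrgen.py | build_qr_payload
-- ===== SOURCE A (Python) =====
-- def build_qr_payload(data_bytes):
--     bits = '0100'  # byte mode
--     bits += format(len(data_bytes), '08b')  # character count
--
--     for byte in data_bytes:
--         bits += format(byte, '08b')  # data bits assembly
--
--     bits += '0000'  # terminator if room / padding
--
--     while len(bits) % 8 != 0:
--         bits += '0'
--
--     # Pad with alternating bytes to reach 152 bits
--     pad_bytes = ['11101100', '00010001']
--     i = 0
--     while len(bits) < 152:
--         bits += pad_bytes[i % 2]
--         i += 1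
--
--     data_codewords = [int(bits[i:i+8], 2) for i in range(0, len(bits), 8)] # splits bytes
--     return data_codewords
-- ===== SOURCE B (Python) =====
-- def build_qr_payload(data_bytes):
--     # Integer bit accumulator: shift each field in and pop completed 8-bit
--     # codewords as they form; no intermediate bit string.
--     out = []
--     acc = 0
--     nbits = 0
--
--     def push(v, w):
--         nonlocal acc, nbits
--         acc = (acc << w) + v
--         nbits += w
--         while nbits >= 8:
--             nbits -= 8
--             out.append(acc >> nbits)
--             acc &= (1 << nbits) - 1
--
--     push(0b0100, 4)             # byte-mode indicator
--     push(len(data_bytes), 8)    # character count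
--     for b in data_bytes:
--         push(b, 8)              # data bytes
--     push(0, 4)                  # terminator
--     if nbits:
--         out.append(acc << (8 - nbits))   # flush the partial byte
--     for i in range(19 - len(out)):       # pad to 19 codewords
--         out.append((0xEC, 0x11)[i % 2])
--     return out
-- ===== Notes on version B (the rewrite author's own statement) =====
-- stated objective: alternative
-- what changed: B replaces A's character-by-character bit-string assembly plus a final int(slice,2) re-parse of every 8-char slice with an integer bit accumulator that shifts each field in and pops completed 8-bit codewords as they form; Pre_ restricts to the natural byte-mode domain (each entry 0-255, fewer than 256 entries): outside it A's format(x,'08b') fields widen past 8 bits (a string-formatting artefact) or, for negatives, carry a '-' that makes int(...,2) raise or yield negative codewords.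
import Mathlib
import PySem

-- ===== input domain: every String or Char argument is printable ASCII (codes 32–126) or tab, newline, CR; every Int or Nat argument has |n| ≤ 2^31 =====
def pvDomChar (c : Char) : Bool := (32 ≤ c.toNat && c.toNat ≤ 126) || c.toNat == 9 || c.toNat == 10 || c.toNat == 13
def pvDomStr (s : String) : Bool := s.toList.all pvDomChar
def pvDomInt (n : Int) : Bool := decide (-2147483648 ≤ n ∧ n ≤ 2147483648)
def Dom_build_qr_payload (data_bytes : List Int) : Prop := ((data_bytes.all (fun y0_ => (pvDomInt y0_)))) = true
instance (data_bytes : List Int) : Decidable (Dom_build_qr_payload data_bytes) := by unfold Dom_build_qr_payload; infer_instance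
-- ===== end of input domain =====

-- B replaces A's character-by-character bit-string assembly and re-parsing with an
-- integer bit accumulator that pops completed 8-bit codewords as fields are pushed
-- (objective: alternative data structure, no intermediate string).

-- ===== PORT A =====

-- format(n, '08b'): binary digits zero-filled to width 8, the sign counted in the
-- width ('-' first for negatives); exact for every int (Nat.toDigits 2 = format(·,'b')).
def fmt08b (n : Int) : List Char :=
  if n < 0 then
    '-' :: (List.replicate (7 - (Nat.toDigits 2 n.natAbs).length) '0' ++ Nat.toDigits 2 n.natAbs)
  else
    List.replicate (8 - (Nat.toDigits 2 n.toNat).length) '0' ++ Nat.toDigits 2 n.toNat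

-- while len(bits) % 8 != 0: bits += '0'
def zfillA (s : List Char) : List Char :=
  if s.length % 8 ≠ 0 then zfillA (s ++ ['0']) else s
  termination_by (8 - s.length % 8) % 8
  decreasing_by simp [List.length_append]; omega

-- pad_bytes = ['11101100', '00010001']; while len(bits) < 152: bits += pad_bytes[i % 2]; i += 1
def padA (s : List Char) (i : Nat) : List Char :=
  if s.length < 152 then
    padA (s ++ (if i % 2 = 0 then ['1','1','1','0','1','1','0','0'] else ['0','0','0','1','0','0','0','1'])) (i + 1)
  else s
  termination_by 152 - s.length
  decreasing_by simp [List.length_append]; split <;> simp <;> omega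

def build_qr_payload (data_bytes : List Int) : List Int :=
  let bits := ['0','1','0','0']
  let bits := bits ++ fmt08b (data_bytes.length : Int)
  let bits := data_bytes.foldl (fun b byte => b ++ fmt08b byte) bits
  let bits := bits ++ ['0','0','0','0']
  let bits := zfillA bits
  let bits := padA bits 0
  -- [int(bits[i:i+8],2) for i in range(0,len,8)]; int(s, 2) raises
  -- ValueError when the slice is not a binary numeral — those inputs are excluded
  -- by Pre_, so the .getD 0 default is never taken on the claimed domain
  (PySem.List.pyRange 0 (bits.length : Int) 8).map
    (fun i => (PySem.Int.ofCharsBase? (PySem.List.slice bits (some i) (some (i + 8))) 2).getD 0)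

-- ===== PORT B =====

-- inner while of push: nbits -= 8; append acc >> nbits; acc &= (1<<nbits)-1.
-- Python's >> by n is floor division by 2^n and & with the mask 2^n-1 is mod 2^n,
-- for every int — PySem.Int.floordiv / mod are exact here.
def flushB (acc : Int) (nbits : Nat) (out : List Int) : Int × Nat × List Int :=
  if 8 ≤ nbits then
    flushB (PySem.Int.mod acc (2 ^ (nbits - 8))) (nbits - 8)
      (out ++ [PySem.Int.floordiv acc (2 ^ (nbits - 8))])
  else (acc, nbits, out)
  termination_by nbits
  decreasing_by omega

-- push(v, w): acc = (acc << w) + v (<< w is *2^w on every int); nbits += w; then the while loop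
def pushB (st : Int × Nat × List Int) (v : Int) (w : Nat) : Int × Nat × List Int :=
  flushB (st.1 * 2 ^ w + v) (st.2.1 + w) st.2.2

def build_qr_payload_alt (data_bytes : List Int) : List Int :=
  let st : Int × Nat × List Int := (0, 0, [])
  let st := pushB st 4 4
  let st := pushB st (data_bytes.length : Int) 8
  let st := data_bytes.foldl (fun st b => pushB st b 8) st
  let st := pushB st 0 4
  let out := if st.2.1 ≠ 0 then st.2.2 ++ [st.1 * 2 ^ (8 - st.2.1)] else st.2.2
  -- for i in range(19 - len(out)): out.append((0xEC, 0x11)[i % 2])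
  (PySem.List.pyRange 0 (19 - (out.length : Int)) 1).foldl
    (fun o i => o ++ [if PySem.Int.mod i 2 = 0 then (236 : Int) else 17]) out

-- ===== PRECONDITION & SPEC =====
-- Pre_ restricts to the natural byte-mode domain — every entry a byte 0..255 and
-- fewer than 256 entries: outside it A's format(x,'08b') fields widen past 8 bits
-- (an artefact of string formatting) or, for negative entries, carry a '-' sign
-- that makes int(..., 2) raise ValueError or yield a negative "codeword".
def Pre_build_qr_payload (data_bytes : List Int) : Prop :=
  data_bytes.length ≤ 255 ∧ ∀ b ∈ data_bytes, 0 ≤ b ∧ b ≤ 255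
instance (data_bytes : List Int) : Decidable (Pre_build_qr_payload data_bytes) := by
  unfold Pre_build_qr_payload; infer_instance

def pvWitness_build_qr_payload : List Int := [72, 105, 33, 0]

def Spec_build_qr_payload (data_bytes : List Int) (out : List Int) : Prop := out = build_qr_payload_alt data_bytes
instance (data_bytes : List Int) (out : List Int) : Decidable (Spec_build_qr_payload data_bytes out) := by unfold Spec_build_qr_payload; infer_instance

-- ===== CLAIM (what is proved, stated in full; the proofs are below) =====
def Claim_equal_build_qr_payload : Prop := ∀ (data_bytes : List Int), Dom_build_qr_payload data_bytes → Pre_build_qr_payload data_bytes → Spec_build_qr_payload data_bytes (build_qr_payload data_bytes)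

-- ===== LEMMAS AND PROOFS =====

-- value of a big-endian binary digit string (what int(s, 2) computes on '0'/'1' chars)
def valN (s : List Char) : Nat := s.foldl (fun a c => 2 * a + (if c = '1' then 1 else 0)) 0

-- big-endian binary digits of m, exactly w of them
def binW : Nat → Nat → List Char
  | _, 0 => []
  | m, w + 1 => binW (m / 2) w ++ [if m % 2 = 1 then '1' else '0']

def isBin (s : List Char) : Prop := ∀ c ∈ s, c = '0' ∨ c = '1'

-- Python's bit length of a positive numeral (and 1 for 0, matching len(format(0,'b')))
def blN : Nat → Nat
  | m => if m < 2 then 1 else blN (m / 2) + 1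
  termination_by m => m
  decreasing_by omega

-- split s into 8-char chunks and take each chunk's value
def chunkC (s : List Char) : List Int :=
  if 8 ≤ s.length then (valN (s.take 8) : Int) :: chunkC (s.drop 8) else []
  termination_by s.length
  decreasing_by simp; omega

theorem length_binW (m w : Nat) : (binW m w).length = w := by
  induction w generalizing m with
  | zero => rfl
  | succ w ih => simp [binW, ih]

theorem isBin_binW (m w : Nat) : isBin (binW m w) := by
  induction w generalizing m with
  | zero => intro c hc; simp [binW] at hc
  | succ w ih =>
    intro c hc
    simp only [binW, List.mem_append, List.mem_singleton] at hc
    rcases hc with h | h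
    · exact ih _ _ h
    · subst h; split <;> simp

theorem valN_foldl (a : Nat) (s : List Char) :
    s.foldl (fun a c => 2 * a + (if c = '1' then 1 else 0)) a = a * 2 ^ s.length + valN s := by
  induction s generalizing a with
  | nil => simp [valN]
  | cons c s ih =>
    have h1 : valN (c :: s) = (2 * 0 + (if c = '1' then 1 else 0)) * 2 ^ s.length + valN s := by
      rw [valN, List.foldl_cons, ih]
    rw [List.foldl_cons, ih, h1, List.length_cons]
    ring

theorem valN_append (xs ys : List Char) :
    valN (xs ++ ys) = valN xs * 2 ^ ys.length + valN ys := by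
  rw [valN, List.foldl_append, ← valN, valN_foldl]

theorem valN_binW (m w : Nat) : valN (binW m w) = m % 2 ^ w := by
  induction w generalizing m with
  | zero => simp [binW, valN, Nat.mod_one]
  | succ w ih =>
    rw [binW, valN_append, ih]
    have h2 : m % (2 * 2 ^ w) = m % 2 + 2 * (m / 2 % 2 ^ w) := Nat.mod_mul ..
    have hm : m % 2 < 2 := Nat.mod_lt _ (by omega)
    have hv : valN [if m % 2 = 1 then '1' else '0'] = m % 2 := by
      split <;> simp_all [valN]
    rw [hv]
    simp only [List.length_singleton, pow_succ]
    rw [mul_comm (2 ^ w) 2, h2]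
    ring

theorem valN_lt (s : List Char) (h : isBin s) : valN s < 2 ^ s.length := by
  induction s with
  | nil => simp [valN]
  | cons c s ih =>
    have h1 : valN (c :: s) = valN [c] * 2 ^ s.length + valN s := by
      rw [← List.singleton_append, valN_append]
    have hc : valN [c] ≤ 1 := by
      rcases h c (by simp) with h' | h' <;> simp [h', valN]
    have hs := ih (fun x hx => h x (by simp [hx]))
    rw [h1, List.length_cons, pow_succ]
    nlinarith

theorem binW_valN (s : List Char) (h : isBin s) : binW (valN s) s.length = s := by
  induction s using List.reverseRecOn with
  | nil => rfl
  | append_singleton ys c ih =>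
    have hc : (if c = '1' then 1 else 0) < 2 := by split <;> omega
    have h1 : valN (ys ++ [c]) = 2 * valN ys + (if c = '1' then 1 else 0) := by
      rw [valN_append]; simp [valN]; ring
    have hys : isBin ys := fun x hx => h x (by simp [hx])
    rw [List.length_append, List.length_singleton, h1, binW]
    have hd : (2 * valN ys + (if c = '1' then 1 else 0)) / 2 = valN ys := by omega
    have hm : (2 * valN ys + (if c = '1' then 1 else 0)) % 2 = (if c = '1' then 1 else 0) := by
      omega
    rw [hd, hm, ih hys]
    rcases h c (by simp) with h' | h' <;> simp [h']

theorem lt_two_pow_blN (m : Nat) : m < 2 ^ blN m := by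
  induction m using Nat.strong_induction_on with
  | _ m ih =>
    rw [blN]
    split
    · next h => simpa using h
    · next h =>
      have h2 : 2 ≤ m := by omega
      have := ih (m / 2) (by omega)
      rw [pow_succ]
      omega

theorem blN_le (m k : Nat) (h1 : 1 ≤ k) (h2 : m < 2 ^ k) : blN m ≤ k := by
  induction m using Nat.strong_induction_on generalizing k with
  | _ m ih =>
    rw [blN]
    split
    · omega
    · next h =>
      have hk2 : 2 ≤ k := by
        by_contra hk
        have : k = 1 := by omega
        subst this
        simp at h2
        omega
      have hm2 : m / 2 < 2 ^ (k - 1) := by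
        have : 2 ^ k = 2 * 2 ^ (k - 1) := by
          rw [← pow_succ']
          congr 1
          omega
        omega
      have := ih (m / 2) (by omega) (k - 1) (by omega) hm2
      omega

theorem binW_cons_zero (w : Nat) (m : Nat) (h : m < 2 ^ w) :
    binW m (w + 1) = '0' :: binW m w := by
  induction w generalizing m with
  | zero =>
    have : m = 0 := by simpa using h
    subst this; rfl
  | succ w ih =>
    have h2 : m / 2 < 2 ^ w := by
      rw [pow_succ] at h; omega
    show binW (m / 2) (w + 1) ++ _ = '0' :: binW m (w + 1)
    rw [ih _ h2]
    rfl

theorem binW_pad (m w k : Nat) (h : m < 2 ^ w) :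
    binW m (w + k) = List.replicate k '0' ++ binW m w := by
  induction k with
  | zero => simp
  | succ k ih =>
    have h2 : m < 2 ^ (w + k) := lt_of_lt_of_le h (Nat.pow_le_pow_right (by omega) (by omega))
    have : w + (k + 1) = (w + k) + 1 := by omega
    rw [this, binW_cons_zero _ _ h2, ih, List.replicate_succ]
    rfl

theorem digitChar_mod_two (m : Nat) :
    (m % 2).digitChar = (if m % 2 = 1 then '1' else '0') := by
  have : m % 2 = 0 ∨ m % 2 = 1 := by omega
  rcases this with h | h <;> rw [h] <;> rfl

theorem toDigitsCore_two (fuel m : Nat) (ds : List Char) (h : m < fuel) :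
    Nat.toDigitsCore 2 fuel m ds = binW m (blN m) ++ ds := by
  induction fuel generalizing m ds with
  | zero => omega
  | succ fuel ih =>
    rw [Nat.toDigitsCore]
    by_cases h2 : m / 2 = 0
    · have hm : m < 2 := by omega
      rw [if_pos h2, blN, if_pos hm, binW, digitChar_mod_two]
      rw [h2]
      rfl
    · rw [if_neg h2]
      have hm2 : 2 ≤ m := by omega
      rw [ih (m / 2) ((m % 2).digitChar :: ds) (by omega)]
      conv_rhs => rw [blN, if_neg (by omega), binW]
      rw [digitChar_mod_two]
      simp

theorem toDigits_two (m : Nat) : Nat.toDigits 2 m = binW m (blN m) := by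
  rw [Nat.toDigits, toDigitsCore_two _ _ _ (by omega), List.append_nil]

theorem fmt08b_eq (v : Int) (h : 0 ≤ v) :
    fmt08b v = binW v.toNat (max 8 (blN v.toNat)) := by
  rw [fmt08b, if_neg (by omega), toDigits_two, length_binW]
  set m := v.toNat with hm
  by_cases h8 : blN m ≤ 8
  · have : max 8 (blN m) = blN m + (8 - blN m) := by omega
    rw [this, binW_pad _ _ _ (lt_two_pow_blN m)]
  · have h1 : 8 - blN m = 0 := by omega
    have h2 : max 8 (blN m) = blN m := by omega
    rw [h1, h2]
    simp

-- on the byte domain the count/data fields are exactly 8 bits wide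
theorem fmt08b_eq8 (v : Int) (h : 0 ≤ v) (h2 : v ≤ 255) :
    fmt08b v = binW v.toNat 8 := by
  rw [fmt08b_eq v h]
  congr 1
  have : v.toNat < 2 ^ 8 := by omega
  have := blN_le v.toNat 8 (by omega) this
  omega

theorem chunkC_nil : chunkC [] = [] := by rw [chunkC]; simp

theorem chunkC_append (x y : List Char) (h : 8 ∣ x.length) :
    chunkC (x ++ y) = chunkC x ++ chunkC y := by
  suffices H : ∀ n x y, List.length x = n → 8 ∣ n → chunkC (x ++ y) = chunkC x ++ chunkC y from
    H x.length x y rfl h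
  intro n
  induction n using Nat.strong_induction_on with
  | _ n ih =>
    intro x y hl hd
    by_cases h8 : 8 ≤ n
    · have hx8 : 8 ≤ x.length := by omega
      have e1 : chunkC (x ++ y) = (↑(valN ((x ++ y).take 8)) : Int) :: chunkC ((x ++ y).drop 8) := by
        rw [chunkC, if_pos (by simp; omega)]
      have e2 : chunkC x = (↑(valN (x.take 8)) : Int) :: chunkC (x.drop 8) := by
        rw [chunkC, if_pos hx8]
      rw [e1, e2, List.take_append_of_le_length hx8, List.drop_append_of_le_length hx8,
        ih (n - 8) (by omega) _ y (by simp [hl]) (by omega)]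
      simp
    · have : n = 0 := by omega
      have hx : x = [] := by
        apply List.eq_nil_of_length_eq_zero; omega
      subst hx
      simp [chunkC_nil]

theorem length_chunkC (s : List Char) : (chunkC s).length = s.length / 8 := by
  suffices H : ∀ n s, List.length s = n → (chunkC s).length = s.length / 8 from H s.length s rfl
  intro n
  induction n using Nat.strong_induction_on with
  | _ n ih =>
    intro s hl
    rw [chunkC]
    split
    · next h8 =>
      rw [List.length_cons, ih (n - 8) (by omega) (s.drop 8) (by simp [hl])]
      rw [List.length_drop]
      omega
    · next h8 =>
      simp only [List.length_nil]
      omega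

set_option maxRecDepth 40000 in
theorem ofCharsBase?_bin8 (v : Nat) (h : v < 256) :
    PySem.Int.ofCharsBase? (binW v 8) 2 = some (v : Int) := by
  have H : ∀ v : Fin 256, PySem.Int.ofCharsBase? (binW v.val 8) 2 = some (v.val : Int) := by
    decide
  exact H ⟨v, h⟩

theorem parse_chunk (t : List Char) (hb : isBin t) (hl : t.length = 8) :
    (PySem.Int.ofCharsBase? t 2).getD 0 = (valN t : Int) := by
  have h1 : binW (valN t) 8 = t := by rw [← hl]; exact binW_valN t hb
  have h2 : valN t < 256 := by have := valN_lt t hb; rwa [hl] at this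
  conv_lhs => rw [← h1, ofCharsBase?_bin8 _ h2]
  rfl

theorem pyRange08 (k : Nat) :
    PySem.List.pyRange 0 ((8 * k : Nat) : Int) 8 = (List.range k).map (fun j => ((8 * j : Nat) : Int)) := by
  rw [PySem.List.pyRange]
  norm_num
  rcases Nat.eq_zero_or_pos k with hk | hk
  · subst hk; simp
  · rw [if_pos (by positivity)]
    have hc : ((8 * (k : Int) + 8 - 1) / 8).toNat = k := by
      have h1 : 8 * (k : Int) + 8 - 1 = ((8 * k + 7 : Nat) : Int) := by push_cast; ring
      rw [h1]
      rw [show ((8 : Int)) = ((8 : Nat) : Int) by norm_num, ← Int.natCast_div]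
      rw [Int.toNat_natCast]
      omega
    rw [hc]

theorem parseA_aux (k : Nat) : ∀ (s : List Char), isBin s → s.length = 8 * k →
    (List.range k).map (fun j => (PySem.Int.ofCharsBase? ((s.drop (8 * j)).take 8) 2).getD 0)
      = chunkC s := by
  induction k with
  | zero =>
    intro s _ hl
    have : s = [] := by apply List.eq_nil_of_length_eq_zero; omega
    subst this
    simp [chunkC_nil]
  | succ k ih =>
    intro s hb hl
    have h8 : 8 ≤ s.length := by omega
    have hbt : isBin (s.take 8) := fun c hc => hb c (List.mem_of_mem_take hc)
    have hbd : isBin (s.drop 8) := fun c hc => hb c (List.mem_of_mem_drop hc)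
    rw [List.range_succ_eq_map, List.map_cons, List.map_map]
    rw [chunkC, if_pos h8]
    congr 1
    · rw [Nat.mul_zero, List.drop_zero]
      exact parse_chunk _ hbt (by simp [List.length_take]; omega)
    · rw [← ih (s.drop 8) hbd (by simp [hl]; omega)]
      apply List.map_congr_left
      intro j _
      simp only [Function.comp]
      rw [show 8 * Nat.succ j = 8 + 8 * j by omega, ← List.drop_drop]

-- A's comprehension [int(bits[i:i+8],2) for i in range(0,len,8)] is chunkC
theorem parseA_eq_chunkC (s : List Char) (hb : isBin s) (hd : 8 ∣ s.length) :
    (PySem.List.pyRange 0 (s.length : Int) 8).map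
      (fun i => (PySem.Int.ofCharsBase? (PySem.List.slice s (some i) (some (i + 8))) 2).getD 0)
      = chunkC s := by
  obtain ⟨k, hk⟩ := hd
  rw [hk, pyRange08, List.map_map, ← parseA_aux k s hb hk]
  apply List.map_congr_left
  intro j hj
  simp only [Function.comp]
  rw [show ((8 * j : Nat) : Int) + 8 = ((8 * j + 8 : Nat) : Int) by push_cast; ring,
    PySem.List.slice_natCast, show 8 * j + 8 - 8 * j = 8 by omega]

-- the canonical accumulator state after having pushed exactly the bits T
def stOf (T : List Char) : Int × Nat × List Int :=
  ((valN (T.drop (8 * (T.length / 8))) : Int), T.length % 8, chunkC T)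

theorem flushB_eq (t : List Char) (out : List Int) (hb : isBin t) :
    flushB (valN t) t.length out
      = ((valN (t.drop (8 * (t.length / 8))) : Int), t.length % 8, out ++ chunkC t) := by
  suffices H : ∀ n t out, List.length t = n → isBin t →
      flushB (valN t) t.length out
        = ((valN (t.drop (8 * (t.length / 8))) : Int), t.length % 8, out ++ chunkC t) from
    H t.length t out rfl hb
  intro n
  induction n using Nat.strong_induction_on with
  | _ n ih =>
    intro t out hl hb
    rw [flushB]
    by_cases h8 : 8 ≤ t.length
    · rw [if_pos h8]
      have hbt : isBin (t.take 8) := fun c hc => hb c (List.mem_of_mem_take hc)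
      have hbd : isBin (t.drop 8) := fun c hc => hb c (List.mem_of_mem_drop hc)
      have hsplit : valN t = valN (t.take 8) * 2 ^ (t.length - 8) + valN (t.drop 8) := by
        conv_lhs => rw [← List.take_append_drop 8 t]
        rw [valN_append, List.length_drop]
      have hlt : valN (t.drop 8) < 2 ^ (t.length - 8) := by
        have := valN_lt _ hbd
        rwa [List.length_drop] at this
      have hB : 0 < 2 ^ (t.length - 8) := Nat.pow_pos (by omega)
      have hpow : ((2 : Int) ^ (t.length - 8)) = ((2 ^ (t.length - 8) : Nat) : Int) := by
        push_cast; rfl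
      have hdiv : PySem.Int.floordiv ((valN t : Nat) : Int) (2 ^ (t.length - 8))
          = ((valN (t.take 8) : Nat) : Int) := by
        rw [hpow, PySem.Int.floordiv_natCast]
        congr 1
        rw [hsplit, add_comm, Nat.add_mul_div_right _ _ hB, Nat.div_eq_of_lt hlt]
        omega
      have hmod : PySem.Int.mod ((valN t : Nat) : Int) (2 ^ (t.length - 8))
          = ((valN (t.drop 8) : Nat) : Int) := by
        rw [hpow, PySem.Int.mod_natCast]
        congr 1
        rw [hsplit, add_comm, Nat.add_mul_mod_self_right, Nat.mod_eq_of_lt hlt]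
      rw [hdiv, hmod]
      rw [show t.length - 8 = (t.drop 8).length by simp]
      rw [ih ((t.drop 8).length) (by simp; omega) (t.drop 8) _ rfl hbd]
      refine Prod.ext ?_ (Prod.ext ?_ ?_)
      · simp only [List.drop_drop, List.length_drop]
        have h9 : 8 + 8 * ((t.length - 8) / 8) = 8 * (t.length / 8) := by omega
        rw [h9]
      · simp only [List.length_drop]
        omega
      · simp only
        conv_rhs => rw [chunkC, if_pos h8]
        rw [List.append_assoc]
        rfl
    · rw [if_neg h8]
      have h0 : t.length / 8 = 0 := by omega
      rw [h0, Nat.mul_zero, List.drop_zero, Nat.mod_eq_of_lt (by omega)]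
      rw [chunkC, if_neg h8, List.append_nil]

theorem isBin_append (x y : List Char) (hx : isBin x) (hy : isBin y) : isBin (x ++ y) := by
  intro c hc
  rcases List.mem_append.mp hc with h | h
  · exact hx c h
  · exact hy c h

theorem chunkC_short (s : List Char) (h : s.length < 8) : chunkC s = [] := by
  rw [chunkC, if_neg (by omega)]

theorem pushB_eq (T : List Char) (hb : isBin T) (v : Int) (w : Nat)
    (hv : 0 ≤ v) (hw : v < 2 ^ w) :
    pushB (stOf T) v w = stOf (T ++ binW v.toNat w) := by
  have hvnat : v.toNat < 2 ^ w := by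
    zify
    rw [Int.toNat_of_nonneg hv]
    exact_mod_cast hw
  set rem := T.drop (8 * (T.length / 8)) with hrem
  have hlenrem : rem.length = T.length % 8 := by
    rw [hrem, List.length_drop]
    omega
  have hbrem : isBin rem := fun c hc => hb c (List.mem_of_mem_drop hc)
  have hbw : isBin (binW v.toNat w) := isBin_binW _ _
  have hbt : isBin (rem ++ binW v.toNat w) := isBin_append _ _ hbrem hbw
  set t := rem ++ binW v.toNat w with ht
  have hlent : t.length = T.length % 8 + w := by
    rw [ht, List.length_append, hlenrem, length_binW]
  have hacc : ((valN rem : Nat) : Int) * 2 ^ w + v = ((valN t : Nat) : Int) := by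
    rw [ht, valN_append, valN_binW, length_binW, Nat.mod_eq_of_lt hvnat]
    push_cast
    rw [Int.toNat_of_nonneg hv]
  rw [pushB]
  show flushB ((valN rem : Nat) * 2 ^ w + v) (T.length % 8 + w) (chunkC T) = _
  rw [hacc, ← hlent]
  rw [flushB_eq t (chunkC T) hbt]
  -- decompose T into complete codewords plus the residue
  have hTsplit : T.take (8 * (T.length / 8)) ++ rem = T := List.take_append_drop _ _
  have hdone : (T.take (8 * (T.length / 8))).length = 8 * (T.length / 8) := by
    rw [List.length_take]
    omega
  have hTbin : T ++ binW v.toNat w = T.take (8 * (T.length / 8)) ++ t := by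
    rw [ht, ← List.append_assoc, hTsplit]
  clear_value t rem
  refine Prod.ext ?_ (Prod.ext ?_ ?_)
  · simp only [stOf]
    congr 1
    rw [hTbin]
    have hX : 8 * ((T.take (8 * (T.length / 8)) ++ t).length / 8)
        = 8 * (T.length / 8) + 8 * (t.length / 8) := by
      rw [List.length_append, hdone, hlent]
      omega
    have hnil : List.drop (8 * (T.length / 8) + 8 * (t.length / 8)) (T.take (8 * (T.length / 8))) = [] :=
      List.drop_eq_nil_of_le (by rw [hdone]; omega)
    have hsub : 8 * (T.length / 8) + 8 * (t.length / 8) - (T.take (8 * (T.length / 8))).length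
        = 8 * (t.length / 8) := by
      rw [hdone]; omega
    conv_rhs => rw [hX, List.drop_append, hnil, hsub, List.nil_append]
  · simp only [stOf]
    rw [List.length_append, length_binW, hlent]
    omega
  · simp only [stOf]
    rw [hTbin, chunkC_append _ _ (by rw [hdone]; exact Dvd.intro _ rfl)]
    congr 1
    conv_lhs => rw [← hTsplit, chunkC_append _ _ (by rw [hdone]; exact Dvd.intro _ rfl)]
    rw [chunkC_short rem (by omega), List.append_nil]

theorem zfillA_eq (s : List Char) :
    zfillA s = s ++ List.replicate ((8 - s.length % 8) % 8) '0' := by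
  rw [zfillA]
  split_ifs with h
  · rw [zfillA_eq (s ++ ['0']), List.append_assoc]
    congr 1
    rw [show (s ++ ['0']).length = s.length + 1 by simp]
    rw [show (8 - s.length % 8) % 8 = ((8 - (s.length + 1) % 8) % 8) + 1 by omega]
    rw [List.replicate_succ, List.singleton_append]
  · have h0 : s.length % 8 = 0 := by omega
    rw [h0]
    norm_num
  termination_by (8 - s.length % 8) % 8
  decreasing_by simp [List.length_append]; omega

def padInts : Nat → Nat → List Int
  | 0, _ => []
  | k + 1, i => (if i % 2 = 0 then (236 : Int) else 17) :: padInts k (i + 1)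

theorem chunkC_padA (s : List Char) (i : Nat) (hd : 8 ∣ s.length) :
    chunkC (padA s i) = chunkC s ++ padInts (19 - s.length / 8) i
      ∧ (isBin s → isBin (padA s i)) ∧ 8 ∣ (padA s i).length := by
  rw [padA]
  by_cases h : s.length < 152
  · rw [if_pos h]
    set p := (if i % 2 = 0 then ['1','1','1','0','1','1','0','0'] else ['0','0','0','1','0','0','0','1'])
      with hp
    have hlp : p.length = 8 := by rw [hp]; split <;> rfl
    have hbp : isBin p := by
      rw [hp]
      unfold isBin
      split <;> · intro c hc; fin_cases hc <;> simp
    have hcp : chunkC p = [if i % 2 = 0 then (236 : Int) else 17] := by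
      rw [chunkC, if_pos (by rw [hlp])]
      rw [hp]
      split
      · norm_num [valN, chunkC_nil]
      · norm_num [valN, chunkC_nil]
    obtain ⟨ih1, ih2, ih3⟩ := chunkC_padA (s ++ p) (i + 1)
      (by rw [List.length_append, hlp]; exact Nat.dvd_add hd (by norm_num))
    refine ⟨?_, ?_, ?_⟩
    · rw [ih1, chunkC_append _ _ hd, hcp, List.length_append, hlp]
      have h19 : 19 - s.length / 8 = (19 - (s.length + 8) / 8) + 1 := by omega
      rw [h19]
      simp [padInts, List.append_assoc]
    · intro hbs
      exact ih2 (isBin_append _ _ hbs hbp)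
    · exact ih3
  · rw [if_neg h]
    have h0 : 19 - s.length / 8 = 0 := by omega
    rw [h0]
    exact ⟨by simp [padInts], fun hb => hb, hd⟩
  termination_by 152 - s.length
  decreasing_by
    simp only [List.length_append]
    split <;> simp <;> omega

theorem valN_replicate (n : Nat) : valN (List.replicate n '0') = 0 := by
  induction n with
  | zero => rfl
  | succ n ih =>
    rw [List.replicate_succ, ← List.singleton_append, valN_append, ih]
    simp [valN]

theorem stOf_nil : stOf [] = ((0 : Int), (0 : Nat), ([] : List Int)) := by
  simp [stOf, chunkC_nil, valN]

theorem foldl_pushB (l : List Int) (hl : ∀ b ∈ l, 0 ≤ b ∧ b ≤ 255) (T : List Char) (hb : isBin T) :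
    l.foldl (fun st b => pushB st b 8) (stOf T)
      = stOf (T ++ l.flatMap (fun b => binW b.toNat 8)) := by
  induction l generalizing T with
  | nil => simp
  | cons b l ih =>
    obtain ⟨hb0, hb1⟩ := hl b (by simp)
    rw [List.foldl_cons,
      pushB_eq T hb b 8 hb0 (by norm_num; omega),
      ih (fun x hx => hl x (by simp [hx])) _ (isBin_append _ _ hb (isBin_binW _ _))]
    rw [List.flatMap_cons, List.append_assoc]

theorem flatMap_fmt (l : List Int) (hl : ∀ b ∈ l, 0 ≤ b ∧ b ≤ 255) :
    l.flatMap fmt08b = l.flatMap (fun b => binW b.toNat 8) := by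
  induction l with
  | nil => rfl
  | cons b l ih =>
    obtain ⟨h0, h1⟩ := hl b (by simp)
    rw [List.flatMap_cons, List.flatMap_cons, fmt08b_eq8 b h0 h1,
      ih (fun x hx => hl x (by simp [hx]))]

theorem padInts_eq_map (k : Nat) : ∀ i, padInts k i
    = (List.range k).map (fun j => if (i + j) % 2 = 0 then (236 : Int) else 17) := by
  induction k with
  | zero => intro i; rfl
  | succ k ih =>
    intro i
    rw [List.range_succ_eq_map, List.map_cons, List.map_map]
    show padInts (k + 1) i = _
    rw [padInts, ih (i + 1)]
    congr 1
    apply List.map_congr_left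
    intro j _
    simp only [Function.comp_apply]
    have : i + 1 + j = i + j.succ := by omega
    rw [this]

theorem isBin_replicate0 (n : Nat) : isBin (List.replicate n '0') := by
  intro c hc
  rw [List.eq_of_mem_replicate hc]
  left; rfl

-- the residual bits of T (the part after the last complete codeword)
theorem chunkC_flush (T : List Char) (hb : isBin T) :
    (if T.length % 8 ≠ 0
      then chunkC T ++ [((valN (T.drop (8 * (T.length / 8))) : Nat) : Int) * 2 ^ (8 - T.length % 8)]
      else chunkC T)
    = chunkC (T ++ List.replicate ((8 - T.length % 8) % 8) '0') := by
  by_cases hr : T.length % 8 = 0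
  · rw [if_neg (by omega), hr]
    norm_num
  · rw [if_pos hr]
    have hz : (8 - T.length % 8) % 8 = 8 - T.length % 8 := by omega
    rw [hz]
    set rem := T.drop (8 * (T.length / 8)) with hrem
    have hlenrem : rem.length = T.length % 8 := by rw [hrem, List.length_drop]; omega
    have hbrem : isBin rem := fun c hc => hb c (List.mem_of_mem_drop hc)
    have hTsplit : T.take (8 * (T.length / 8)) ++ rem = T := List.take_append_drop _ _
    have hdone : (T.take (8 * (T.length / 8))).length = 8 * (T.length / 8) := by
      rw [List.length_take]; omega
    have hdvd : 8 ∣ (T.take (8 * (T.length / 8))).length := by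
      rw [hdone]; exact Dvd.intro _ rfl
    have h8 : (rem ++ List.replicate (8 - T.length % 8) '0').length = 8 := by
      rw [List.length_append, hlenrem, List.length_replicate]; omega
    have hone : chunkC (rem ++ List.replicate (8 - T.length % 8) '0')
        = [((valN rem : Nat) : Int) * 2 ^ (8 - T.length % 8)] := by
      rw [chunkC, if_pos (by omega), List.take_of_length_le (by omega),
        List.drop_eq_nil_of_le (by omega), chunkC_nil, valN_append, valN_replicate,
        List.length_replicate]
      push_cast
      ring_nf
    have key : T ++ List.replicate (8 - T.length % 8) '0'
        = T.take (8 * (T.length / 8)) ++ (rem ++ List.replicate (8 - T.length % 8) '0') := by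
      rw [← List.append_assoc, hTsplit]
    have hT : chunkC T = chunkC (T.take (8 * (T.length / 8))) := by
      conv_lhs => rw [← hTsplit]
      rw [chunkC_append _ _ hdvd, chunkC_short rem (by omega), List.append_nil]
    rw [key, chunkC_append _ _ hdvd, hone, hT]

-- ===== VERDICT (by name: the statement is the Claim_ definition above) =====
theorem build_qr_payload_spec : Claim_equal_build_qr_payload := by
  intro db _ hpre
  obtain ⟨hlen, hbytes⟩ := hpre
  unfold Spec_build_qr_payload
  simp only [build_qr_payload, build_qr_payload_alt]
  rw [PySem.List.foldl_append_eq_flatMap, flatMap_fmt db hbytes,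
    fmt08b_eq8 (db.length : Int) (by positivity) (by exact_mod_cast hlen), Int.toNat_natCast]
  rw [show ((0 : Int), (0 : Nat), ([] : List Int)) = stOf [] from stOf_nil.symm]
  rw [pushB_eq [] (by intro c hc; simp at hc) 4 4 (by norm_num) (by norm_num),
    List.nil_append]
  rw [pushB_eq _ (isBin_binW _ _) _ 8 (by positivity)
    (by norm_num; omega)]
  rw [Int.toNat_natCast]
  have hbinflat : isBin (db.flatMap (fun b => binW b.toNat 8)) := by
    intro c hc
    obtain ⟨x, _, hcx⟩ := List.mem_flatMap.mp hc
    exact isBin_binW _ _ c hcx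
  rw [foldl_pushB db hbytes _ (isBin_append _ _ (isBin_binW _ _) (isBin_binW _ _))]
  rw [pushB_eq _ (isBin_append _ _ (isBin_append _ _ (isBin_binW _ _) (isBin_binW _ _)) hbinflat)
      0 4 (by norm_num) (by norm_num)]
  rw [show binW (4 : Int).toNat 4 = ['0','1','0','0'] from rfl,
    show binW (0 : Int).toNat 4 = ['0','0','0','0'] from rfl]
  set TA : List Char := ((['0','1','0','0'] ++ binW db.length 8)
      ++ db.flatMap (fun b => binW b.toNat 8)) ++ ['0','0','0','0'] with hTAdef
  have hbTA : isBin TA := by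
    rw [hTAdef]
    exact isBin_append _ _ (isBin_append _ _ (isBin_append _ _
      (by intro c hc; fin_cases hc <;> simp) (isBin_binW _ _)) hbinflat)
      (by intro c hc; fin_cases hc <;> simp)
  rw [zfillA_eq TA]
  set F : List Char := TA ++ List.replicate ((8 - TA.length % 8) % 8) '0' with hFdef
  have hdF : 8 ∣ F.length := by
    rw [hFdef, List.length_append, List.length_replicate]
    omega
  have hbF : isBin F := by
    rw [hFdef]
    exact isBin_append _ _ hbTA (isBin_replicate0 _)
  obtain ⟨hc1, hc2, hc3⟩ := chunkC_padA F 0 hdF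
  rw [parseA_eq_chunkC _ (hc2 hbF) hc3, hc1]
  -- B side: fold the partial byte into the completed codewords
  have hflush := chunkC_flush TA hbTA
  rw [← hFdef] at hflush
  simp only [stOf]
  rw [hflush]
  -- B side: the padding loop appends exactly the alternating pad codewords
  rw [PySem.List.pyRange_one, List.foldl_map, PySem.List.foldl_append_singleton_eq_map]
  congr 1
  have hK : ((19 : Int) - ↑(chunkC F).length - 0).toNat = 19 - F.length / 8 := by
    rw [length_chunkC]
    omega
  rw [hK, padInts_eq_map]
  apply List.map_congr_left
  intro j _
  have hmod : PySem.Int.mod ((0 : Int) + ↑j) 2 = ((j % 2 : Nat) : Int) := by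
    rw [zero_add, PySem.Int.mod_eq_emod_of_pos (by norm_num)]
    omega
  rw [hmod]
  by_cases hj : j % 2 = 0
  · rw [if_pos (show (0 + j) % 2 = 0 by omega),
      if_pos (show ((j % 2 : Nat) : Int) = 0 by exact_mod_cast hj)]
  · rw [if_neg (show ¬(0 + j) % 2 = 0 by omega),
      if_neg (show ¬((j % 2 : Nat) : Int) = 0 by exact_mod_cast hj)]
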